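-- pv_equiv track=rewrite | github.com/Lake3L/vis_graph_prj | visual_graph.py | bfs_recursive
-- ===== SOURCE A (Python) =====
-- def bfs_recursive(graph, start, max_depth, filter_substring):
--     """Корректный рекурсивный BFS с учётом глубины и фильтрации"""
--     visited = set()
--     result = {}
--     order = []  # Для сохранения порядка вывода
--
--     def _bfs(nodes, current_depth):
--         if current_depth > max_depth or not nodes:
--             return
--
--         next_level = []
--         current_level_nodes = []
--
--         for node in nodes:
--             # Пропускаем уже посещённые и отфильтрованные
--             if node in visited or (filter_substring and filter_substring in node):
--                 continue
--
--             visited.add(node)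
--             current_level_nodes.append(node)
--
--             # Получаем зависимости только если глубина позволяет
--             dependencies = graph.get(node, []) if current_depth < max_depth else []
--             filtered_deps = []
--
--             for dep in dependencies:
--                 if dep in visited or (filter_substring and filter_substring in dep):
--                     continue
--
--                 filtered_deps.append(dep)
--                 if dep not in next_level and dep not in visited:
--                     next_level.append(dep)
--
--             result[node] = filtered_deps
--
--         # Сохраняем порядок обработки уровня
--         order.extend(current_level_nodes)
--         _bfs(next_level, current_depth + 1)
--
--     _bfs([start], 0)
--
--     # Формируем результат в правильном порядке
--     ordered_result = {}
--     for node in order: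
--         if node in result:
--             ordered_result[node] = result[node]
--
--     return ordered_result
-- ===== SOURCE B (Python) =====
-- def bfs_recursive(graph, start, max_depth, filter_substring):
--     """Iterative depth-limited BFS: the ordered result dict itself serves as the
--     visited set and the output order, so no recursion, no separate visited/order,
--     and no final reordering pass are needed."""
--     result = {}
--     level = [start]
--     depth = 0
--     while level and depth <= max_depth:
--         next_level = []
--         for node in level:
--             if node in result or (filter_substring and filter_substring in node):
--                 continue
--             deps = graph.get(node, []) if depth < max_depth else []
--             filtered = []
--             for dep in deps:
--                 if dep == node or dep in result or (filter_substring and filter_substring in dep):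
--                     continue
--                 filtered.append(dep)
--                 if dep not in next_level:
--                     next_level.append(dep)
--             result[node] = filtered
--         level = next_level
--         depth += 1
--     return result
-- ===== Notes on version B (the rewrite author's own statement) =====
-- stated objective: simpler
-- what changed: Replaces A's self-recursive _bfs plus its three parallel structures (visited set, result dict, order list) and the final reordering pass by a single iterative while-loop over levels in which the insertion-ordered result dict itself serves as visited set and output order, returned directly.
import Mathlib
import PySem

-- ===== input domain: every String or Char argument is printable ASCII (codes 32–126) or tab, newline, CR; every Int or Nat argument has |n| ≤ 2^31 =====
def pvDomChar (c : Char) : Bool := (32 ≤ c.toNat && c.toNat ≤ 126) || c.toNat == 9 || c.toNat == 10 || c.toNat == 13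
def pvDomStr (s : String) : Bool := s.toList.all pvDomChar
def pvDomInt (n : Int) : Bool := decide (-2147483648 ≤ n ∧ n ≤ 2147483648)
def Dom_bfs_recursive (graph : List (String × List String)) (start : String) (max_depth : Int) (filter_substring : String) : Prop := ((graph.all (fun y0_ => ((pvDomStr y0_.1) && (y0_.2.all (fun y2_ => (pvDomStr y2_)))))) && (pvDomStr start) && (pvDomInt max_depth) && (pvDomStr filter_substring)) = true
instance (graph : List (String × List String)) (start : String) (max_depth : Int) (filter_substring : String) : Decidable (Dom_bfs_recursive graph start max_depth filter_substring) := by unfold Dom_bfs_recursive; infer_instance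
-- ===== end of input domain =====

-- B replaces A's self-recursive `_bfs` plus the visited set / order list / final
-- reordering pass by one iterative level loop over a single ordered result dict
-- (objective: simpler; same asymptotic cost).

-- shared primitive: Python's `filter_substring and filter_substring in s`
def pvFiltered (fs : String) (s : String) : Bool := fs ≠ "" && PySem.Str.isIn fs s

-- shared primitive: Python's `graph.get(node, [])` on the association-list dict
def pvGraphGet (graph : List (String × List String)) (node : String) : List String :=
  ((graph.find? (fun p => p.1 == node)).map (·.2)).getD []

-- ===== PORT A =====
-- inner `for dep in dependencies` loop; state = (filtered_deps, next_level)
def aDepLoop (visited : PySem.Set String) (fs : String) (deps : List String)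
    (acc : List String × List String) : List String × List String :=
  deps.foldl (fun acc dep =>
    if visited.contains dep || pvFiltered fs dep then acc
    else
      (acc.1 ++ [dep],
       if !acc.2.contains dep && !visited.contains dep then acc.2 ++ [dep] else acc.2)) acc

-- `for node in nodes` loop; state = (visited, result, next_level, current_level_nodes)
def aNodeLoop (graph : List (String × List String)) (max_depth : Int) (fs : String)
    (current_depth : Int) (nodes : List String)
    (st : PySem.Set String × PySem.Dict String (List String) × List String × List String) :
    PySem.Set String × PySem.Dict String (List String) × List String × List String :=
  nodes.foldl (fun st node =>
    let (visited, result, next_level, cln) := st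
    if visited.contains node || pvFiltered fs node then st
    else
      let visited := visited.add node
      let cln := cln ++ [node]
      let deps := if current_depth < max_depth then pvGraphGet graph node else []
      let (fd, nl) := aDepLoop visited fs deps ([], next_level)
      (visited, result.insert node fd, nl, cln)) st

-- the recursive `_bfs`; fuel = (max_depth + 1 - current_depth).toNat keeps the
-- recursion structural: fuel = 0 forces current_depth > max_depth, the same exit
def aBfs (graph : List (String × List String)) (max_depth : Int) (fs : String)
    (fuel : Nat) (nodes : List String) (current_depth : Int)
    (visited : PySem.Set String) (result : PySem.Dict String (List String)) (order : List String) :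
    PySem.Set String × PySem.Dict String (List String) × List String :=
  match fuel with
  | 0 => (visited, result, order)
  | fuel + 1 =>
    if current_depth > max_depth ∨ nodes = [] then (visited, result, order)
    else
      let (visited', result', nl, cln) := aNodeLoop graph max_depth fs current_depth nodes (visited, result, [], [])
      aBfs graph max_depth fs fuel nl (current_depth + 1) visited' result' (order ++ cln)

def bfs_recursive (graph : List (String × List String)) (start : String) (max_depth : Int) (filter_substring : String) : List (String × List String) :=
  let (_, result, order) := aBfs graph max_depth filter_substring (max_depth + 1).toNat [start] 0 PySem.Set.empty PySem.Dict.empty []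
  (order.foldl (fun (od : PySem.Dict String (List String)) node =>
      if result.contains node then od.insert node (result.getD node []) else od)
    PySem.Dict.empty).items

-- ===== PORT B =====
-- one level of the `while` body; state = (result, next_level)
def bLevel (graph : List (String × List String)) (max_depth : Int) (fs : String)
    (depth : Int) (level : List String)
    (st : PySem.Dict String (List String) × List String) :
    PySem.Dict String (List String) × List String :=
  level.foldl (fun st node =>
    if st.1.contains node || pvFiltered fs node then st
    else
      let deps := if depth < max_depth then pvGraphGet graph node else []
      let (fd, nl) := deps.foldl (fun acc dep =>
          if dep == node || st.1.contains dep || pvFiltered fs dep then acc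
          else (acc.1 ++ [dep], if acc.2.contains dep then acc.2 else acc.2 ++ [dep]))
        ([], st.2)
      (st.1.insert node fd, nl)) st

-- the `while level and depth <= max_depth` loop; same structural fuel as aBfs
def bLoop (graph : List (String × List String)) (max_depth : Int) (fs : String)
    (fuel : Nat) (result : PySem.Dict String (List String)) (level : List String) (depth : Int) :
    PySem.Dict String (List String) :=
  match fuel with
  | 0 => result
  | fuel + 1 =>
    if level = [] ∨ depth > max_depth then result
    else
      let (result', nl) := bLevel graph max_depth fs depth level (result, [])
      bLoop graph max_depth fs fuel result' nl (depth + 1)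

def bfs_recursive_alt (graph : List (String × List String)) (start : String) (max_depth : Int) (filter_substring : String) : List (String × List String) :=
  (bLoop graph max_depth filter_substring (max_depth + 1).toNat PySem.Dict.empty [start] 0).items

-- ===== PRECONDITION & SPEC =====
def Spec_bfs_recursive (graph : List (String × List String)) (start : String) (max_depth : Int) (filter_substring : String) (out : List (String × List String)) : Prop := out = bfs_recursive_alt graph start max_depth filter_substring
instance (graph : List (String × List String)) (start : String) (max_depth : Int) (filter_substring : String) (out : List (String × List String)) : Decidable (Spec_bfs_recursive graph start max_depth filter_substring out) := by unfold Spec_bfs_recursive; infer_instance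

-- ===== CLAIM (what is proved, stated in full; the proofs are below) =====
def Claim_equal_bfs_recursive : Prop := ∀ (graph : List (String × List String)) (start : String) (max_depth : Int) (filter_substring : String), Dom_bfs_recursive graph start max_depth filter_substring → Spec_bfs_recursive graph start max_depth filter_substring (bfs_recursive graph start max_depth filter_substring)

-- ===== LEMMAS AND PROOFS =====

lemma set_contains_add (s : PySem.Set String) (a x : String) :
    (PySem.Set.add s a).contains x = (x == a || s.contains x) := by
  cases h' : x == a <;>
    simp_all [PySem.Set.contains_eq_listContains, PySem.Set.add] <;>
    split_ifs with h <;> simp_all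

lemma dep_eq (fs node : String) (v : PySem.Set String) (r : PySem.Dict String (List String))
    (hv : ∀ x, v.contains x = (x == node || r.contains x)) (deps : List String)
    (acc : List String × List String) :
    aDepLoop v fs deps acc =
      deps.foldl (fun acc dep =>
        if dep == node || r.contains dep || pvFiltered fs dep then acc
        else (acc.1 ++ [dep], if acc.2.contains dep then acc.2 else acc.2 ++ [dep])) acc := by
  unfold aDepLoop
  apply PySem.List.foldl_congr_mem
  intro acc dep _
  cases hc : (dep == node || r.contains dep || pvFiltered fs dep) <;>
    simp_all [Bool.or_assoc]


lemma level_sim (graph : List (String × List String)) (md : Int) (fs : String) (d : Int) :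
    ∀ (nodes : List String) (v : PySem.Set String) (r : PySem.Dict String (List String))
      (nl cln p : List String),
      (∀ x, v.contains x = r.contains x) → r.keys.Nodup → p ++ cln = r.keys →
      (aNodeLoop graph md fs d nodes (v, r, nl, cln)).2.1 = (bLevel graph md fs d nodes (r, nl)).1
      ∧ (aNodeLoop graph md fs d nodes (v, r, nl, cln)).2.2.1 = (bLevel graph md fs d nodes (r, nl)).2
      ∧ (∀ x, (aNodeLoop graph md fs d nodes (v, r, nl, cln)).1.contains x
            = (bLevel graph md fs d nodes (r, nl)).1.contains x)
      ∧ (bLevel graph md fs d nodes (r, nl)).1.keys.Nodup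
      ∧ p ++ (aNodeLoop graph md fs d nodes (v, r, nl, cln)).2.2.2
          = (bLevel graph md fs d nodes (r, nl)).1.keys := by
  intro nodes
  induction nodes with
  | nil => intro v r nl cln p hv hnd hord; simp only [aNodeLoop, bLevel, List.foldl_nil]; exact ⟨trivial, trivial, hv, hnd, hord⟩
  | cons node rest ih =>
    intro v r nl cln p hv hnd hord
    have hv' := hv node
    by_cases hc : (r.contains node || pvFiltered fs node) = true
    · have ha : aNodeLoop graph md fs d (node :: rest) (v, r, nl, cln)
          = aNodeLoop graph md fs d rest (v, r, nl, cln) := by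
        conv_lhs => simp only [aNodeLoop, List.foldl_cons]
        simp only [aNodeLoop, hv', hc, if_pos]
      have hb : bLevel graph md fs d (node :: rest) (r, nl)
          = bLevel graph md fs d rest (r, nl) := by
        conv_lhs => simp only [bLevel, List.foldl_cons]
        simp only [bLevel, hc, if_pos]
      rw [ha, hb]; exact ih v r nl cln p hv hnd hord
    · have hcb := Bool.not_eq_true _ |>.mp hc
      have hrn : r.contains node = false := by
        cases h : r.contains node <;> simp_all
      have hv2 : ∀ x, (PySem.Set.add v node).contains x = (x == node || r.contains x) := by
        intro x; rw [set_contains_add, hv x]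
      set deps := (if d < md then pvGraphGet graph node else []) with hdeps
      set FDNL := aDepLoop (PySem.Set.add v node) fs deps ([], nl) with hfdnl
      have hdep : deps.foldl (fun acc dep =>
            if dep == node || r.contains dep || pvFiltered fs dep then acc
            else (acc.1 ++ [dep], if acc.2.contains dep then acc.2 else acc.2 ++ [dep]))
          ([], nl) = FDNL := (dep_eq fs node _ r hv2 deps ([], nl)).symm
      have ha : aNodeLoop graph md fs d (node :: rest) (v, r, nl, cln)
          = aNodeLoop graph md fs d rest
              (PySem.Set.add v node, r.insert node FDNL.1, FDNL.2, cln ++ [node]) := by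
        conv_lhs => simp only [aNodeLoop, List.foldl_cons]
        simp only [aNodeLoop, hv', hcb, ← hdeps, ← hfdnl]
        simp
      have hb : bLevel graph md fs d (node :: rest) (r, nl)
          = bLevel graph md fs d rest (r.insert node FDNL.1, FDNL.2) := by
        conv_lhs => simp only [bLevel, List.foldl_cons]
        simp only [bLevel, hcb, ← hdeps, hdep]
        simp
      rw [ha, hb]
      apply ih
      · intro x
        rw [hv2 x, PySem.Dict.contains_insert]
      · rw [PySem.Dict.keys_insert_of_not_contains _ _ hrn]
        refine List.Nodup.append hnd (List.nodup_singleton _) ?_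
        intro a ha1 ha2
        simp at ha2; subst ha2
        exact absurd ((PySem.Dict.contains_iff_mem_keys _ _).mpr ha1) (by simp [hrn])
      · rw [PySem.Dict.keys_insert_of_not_contains _ _ hrn, ← hord, List.append_assoc]

lemma loop_sim (graph : List (String × List String)) (md : Int) (fs : String) :
    ∀ (n : ℕ) (nodes : List String) (d : Int) (v : PySem.Set String)
      (r : PySem.Dict String (List String)) (order : List String),
      (md + 1 - d).toNat = n →
      (∀ x, v.contains x = r.contains x) → r.keys.Nodup → order = r.keys →
      (aBfs graph md fs n nodes d v r order).2.1 = bLoop graph md fs n r nodes d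
      ∧ (aBfs graph md fs n nodes d v r order).2.2 = (bLoop graph md fs n r nodes d).keys
      ∧ (bLoop graph md fs n r nodes d).keys.Nodup := by
  intro n
  induction n with
  | zero =>
    intro nodes d v r order hn hv hnd hord
    exact ⟨rfl, hord, hnd⟩
  | succ n ih =>
    intro nodes d v r order hn hv hnd hord
    by_cases hstop : d > md ∨ nodes = []
    · rw [aBfs, bLoop]
      have hstop' : nodes = [] ∨ d > md := hstop.symm
      simp [hstop, hstop', hord, hnd]
    · have hd : ¬ d > md := fun h => hstop (Or.inl h)
      have hnn : ¬ nodes = [] := fun h => hstop (Or.inr h)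
      obtain ⟨e1, e2, e3, e4, e5⟩ :=
        level_sim graph md fs d nodes v r [] [] r.keys hv hnd (by simp)
      rw [aBfs, bLoop]
      simp only [hstop, if_false]
      rcases hA : aNodeLoop graph md fs d nodes (v, r, [], []) with ⟨v', r', nl', cln'⟩
      rcases hB : bLevel graph md fs d nodes (r, []) with ⟨rb', nlb'⟩
      rw [hA] at e1 e2 e3 e5
      rw [hB] at e1 e2 e3 e4 e5
      simp only at e1 e2 e3 e4 e5
      subst e1 e2
      have := ih nl' (d + 1) v' r' (order ++ cln') (by omega) e3 e4 (by rw [hord, e5])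
      simpa [hnn, hd, hstop] using this

lemma recon (dd : PySem.Dict String (List String)) (hnd : dd.keys.Nodup) :
    (dd.keys.foldl (fun od node =>
        if dd.contains node then od.insert node (dd.getD node []) else od)
      PySem.Dict.empty).items = dd.items := by
  rw [PySem.List.foldl_congr_mem _ _ (g := fun od node => od.insert node (dd.getD node []))
      PySem.Dict.empty (by
        intro acc x hx
        rw [if_pos ((PySem.Dict.contains_iff_mem_keys dd x).mpr hx)])]
  rw [PySem.Dict.items_foldl_insert_fresh dd.keys _ _ PySem.Dict.empty
      (fun a _ => PySem.Dict.contains_empty a) (by simpa using hnd)]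
  rw [← PySem.Dict.items_eq_map_keys dd hnd []]
  simp [PySem.Dict.empty]

-- ===== VERDICT (by name: the statement is the Claim_ definition above) =====
theorem bfs_recursive_spec : Claim_equal_bfs_recursive := by
  intro graph start md fs _
  unfold Spec_bfs_recursive bfs_recursive bfs_recursive_alt
  obtain ⟨h1, h2, h3⟩ :=
    loop_sim graph md fs (md + 1).toNat [start] 0 PySem.Set.empty PySem.Dict.empty [] (by omega)
      (by intro x; simp [PySem.Set.contains_eq_listContains, PySem.Set.empty])
      (by simp) (by simp)
  rcases hA : aBfs graph md fs (md + 1).toNat [start] 0 PySem.Set.empty PySem.Dict.empty [] with ⟨v, res, ord⟩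
  rw [hA] at h1 h2
  simp only at h1 h2
  subst h1 h2
  exact recon _ h3
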